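-- pv_equiv track=rewrite | github.com/gofarrrr/lolla2 | src/engine/performance/contextual_research_engine.py | _extract_market_applications
-- ===== SOURCE A (Python) =====
-- from typing import Dict, List, Any, Optional
--
-- def _extract_market_applications(content: str) -> List[str]:
--     """Extract market applications from research content"""
--     applications = []
--
--     # Look for market/industry applications
--     content_lower = content.lower()
--     market_indicators = [
--         "medical",
--         "automotive",
--         "ar/vr",
--         "industrial",
--         "aerospace",
--         "defense",
--         "consumer",
--         "enterprise",
--     ]
--
--     for indicator in market_indicators:
--         if indicator in content_lower:
--             # Find context around the indicator
--             sentences = content.split(".")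
--             for sentence in sentences:
--                 if indicator in sentence.lower() and len(sentence.strip()) > 30:
--                     applications.append(sentence.strip() + ".")
--                     break
--
--     return applications[:4]  # Top 4 applications
-- ===== SOURCE B (Python) =====
-- from typing import List
--
--
-- def _extract_market_applications(content: str) -> List[str]:
--     """Extract market applications: one pass over sentences, first-match table per indicator."""
--     market_indicators = [
--         "medical",
--         "automotive",
--         "ar/vr",
--         "industrial",
--         "aerospace",
--         "defense",
--         "consumer",
--         "enterprise",
--     ]
--
--     found = {}
--     for sentence in content.split("."):
--         stripped = sentence.strip()
--         if len(stripped) > 30: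
--             low = sentence.lower()
--             for indicator in market_indicators:
--                 if indicator not in found and indicator in low:
--                     found[indicator] = stripped + "."
--     return [found[i] for i in market_indicators if i in found][:4]
-- ===== Notes on version B (the rewrite author's own statement) =====
-- stated objective: alternative
-- what changed: Instead of re-splitting the content and rescanning all sentences once per indicator, B splits and lowercases each sentence once in a single pass, records the first matching sentence per indicator in a dict, and emits the table in indicator order.
import Mathlib
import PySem

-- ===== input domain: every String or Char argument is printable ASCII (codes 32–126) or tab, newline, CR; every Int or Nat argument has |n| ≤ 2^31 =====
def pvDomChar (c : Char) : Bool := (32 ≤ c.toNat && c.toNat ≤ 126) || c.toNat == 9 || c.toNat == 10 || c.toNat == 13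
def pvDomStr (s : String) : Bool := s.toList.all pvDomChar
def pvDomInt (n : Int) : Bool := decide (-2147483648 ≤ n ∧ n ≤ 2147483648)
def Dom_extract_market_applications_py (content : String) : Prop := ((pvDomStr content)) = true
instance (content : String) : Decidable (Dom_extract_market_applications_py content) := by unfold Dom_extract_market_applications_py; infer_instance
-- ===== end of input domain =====

-- B replaces A's per-indicator re-split and rescan of the content by one split and one pass
-- over the sentences that records the first matching sentence per indicator in a dict.

-- the market_indicators list both Pythons write out literally
def pvIndicators : List String :=
  ["medical", "automotive", "ar/vr", "industrial", "aerospace", "defense", "consumer", "enterprise"]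

-- ===== PORT A =====
-- A's inner 'for sentence in sentences: … append; break' loop
def pvInnerA (ind : String) (apps : List String) : List String → List String
  | [] => apps
  | s :: rest =>
    if PySem.Str.isIn ind (PySem.Str.lower s) && decide ((30 : Int) < PySem.Str.len (PySem.Str.strip s)) then
      apps ++ [PySem.Str.strip s ++ "."]
    else pvInnerA ind apps rest

def extract_market_applications_py (content : String) : List String :=
  let content_lower := PySem.Str.lower content
  let applications := pvIndicators.foldl (fun apps ind =>
    if PySem.Str.isIn ind content_lower then
      -- sentences = content.split(".")  (sep "." is non-empty, so split? is always some)
      let sentences := (PySem.Str.split? content ".").getD []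
      pvInnerA ind apps sentences
    else apps) []
  PySem.List.slice applications none (some 4)

-- ===== PORT B =====
def extract_market_applications_py_alt (content : String) : List String :=
  let found := ((PySem.Str.split? content ".").getD []).foldl (fun d s =>
    let stripped := PySem.Str.strip s
    if (30 : Int) < PySem.Str.len stripped then
      let low := PySem.Str.lower s
      pvIndicators.foldl (fun d ind =>
        if !d.contains ind && PySem.Str.isIn ind low then d.insert ind (stripped ++ ".") else d) d
    else d) PySem.Dict.empty
  PySem.List.slice (pvIndicators.filterMap (fun ind => found.get? ind)) none (some 4)

-- ===== PRECONDITION & SPEC =====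
def Spec_extract_market_applications_py (content : String) (out : List String) : Prop := out = extract_market_applications_py_alt content
instance (content : String) (out : List String) : Decidable (Spec_extract_market_applications_py content out) := by unfold Spec_extract_market_applications_py; infer_instance

-- ===== CLAIM (what is proved, stated in full; the proofs are below) =====
def Claim_equal_extract_market_applications_py : Prop := ∀ (content : String), Dom_extract_market_applications_py content → Spec_extract_market_applications_py content (extract_market_applications_py content)

-- ===== LEMMAS AND PROOFS =====

-- the per-sentence match condition both programs test
def pvP (ind s : String) : Bool :=
  PySem.Str.isIn ind (PySem.Str.lower s) && decide ((30 : Int) < PySem.Str.len (PySem.Str.strip s))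

-- A's inner loop is 'first match, appended'
theorem pvInnerA_eq (ind : String) (apps l) :
    pvInnerA ind apps l = apps ++ ((l.find? (pvP ind)).map (fun s => PySem.Str.strip s ++ ".")).toList := by
  induction l with
  | nil => simp [pvInnerA]
  | cons s rest ih =>
    have hd : pvInnerA ind apps (s :: rest)
        = if pvP ind s = true then apps ++ [PySem.Str.strip s ++ "."] else pvInnerA ind apps rest := rfl
    rw [hd]
    by_cases h : pvP ind s = true
    · rw [if_pos h, List.find?_cons_of_pos h]; simp
    · rw [if_neg h, List.find?_cons_of_neg (by simpa using h), ih]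

-- every piece produced by Chars.splitOn.go is an infix of (cur.reverse ++ l), given acc pieces are
theorem pvGo_infix (sep : List Char) (s0 : List Char) :
    ∀ (fuel : Nat) (l cur : List Char) (acc : List (List Char)),
      (∀ p ∈ acc, p <:+: s0) → (cur.reverse ++ l) <:+: s0 →
      ∀ p ∈ PySem.Chars.splitOn.go sep fuel l cur acc, p <:+: s0 := by
  intro fuel
  induction fuel with
  | zero =>
    intro l cur acc hacc hc p hp
    simp [PySem.Chars.splitOn.go] at hp
    rcases hp with h | h
    · exact hacc p h
    · subst h; exact hc
  | succ fuel ih =>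
    intro l cur acc hacc hc p hp
    cases l with
    | nil =>
      simp [PySem.Chars.splitOn.go] at hp
      rcases hp with h | h
      · exact hacc p h
      · subst h
        exact List.IsPrefix.isInfix (l₂ := cur.reverse ++ []) (by simp) |>.trans hc
    | cons c rest =>
      rw [PySem.Chars.splitOn.go] at hp
      by_cases hpre : sep.isPrefixOf (c :: rest) = true
      · simp only [hpre, if_true] at hp
        refine ih _ _ _ ?_ ?_ p hp
        · intro q hq
          rcases List.mem_cons.mp hq with hq | hq
          · subst hq
            exact (List.IsPrefix.isInfix (l₂ := cur.reverse ++ (c :: rest)) (by simp)).trans hc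
          · exact hacc q hq
        · refine List.IsInfix.trans ?_ hc
          simp only [List.reverse_nil, List.nil_append]
          exact ((List.drop_suffix sep.length (c :: rest)).isInfix).trans
            (List.suffix_append (cur.reverse) (c :: rest)).isInfix
      · simp only [hpre] at hp
        refine ih _ _ _ hacc ?_ p hp
        simpa using hc

-- every sentence of content.split(".") is an infix of content (on char lists)
theorem pvSentence_infix (content : String) (s : String)
    (hs : s ∈ (PySem.Str.split? content ".").getD []) : s.toList <:+: content.toList := by
  have hmap := PySem.Str.split?_map content "."
  cases hsp : PySem.Str.split? content "." with
  | none => rw [hsp] at hmap; simp [PySem.Chars.split?] at hmap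
  | some pieces =>
    rw [hsp] at hmap
    simp [PySem.Chars.split?] at hmap
    rw [hsp] at hs
    simp only [Option.getD_some] at hs
    have hmem : s.toList ∈ PySem.Chars.splitOn content.toList ['.'] := by
      rw [← hmap]; exact List.mem_map_of_mem hs
    rw [PySem.Chars.splitOn] at hmem
    exact pvGo_infix _ _ _ _ _ _ (by simp) (by simp) _ hmem

-- A's content_lower guard is redundant: a sentence match implies a whole-content match
theorem pvGuard (content ind s : String)
    (hs : s ∈ (PySem.Str.split? content ".").getD [])
    (h : PySem.Str.isIn ind (PySem.Str.lower s) = true) :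
    PySem.Str.isIn ind (PySem.Str.lower content) = true := by
  rw [PySem.Str.isIn_iff_infix] at h ⊢
  rw [PySem.Str.toList_lower] at h ⊢
  have hinf := pvSentence_infix content s hs
  exact h.trans (by simpa [PySem.Chars.lower] using hinf.map (PySem.Chars.lowerChar))

-- A as a filterMap of first matches over the indicator list
theorem pvFoldlA (l : List String) (g : String → Option String) (apps : List String) :
    l.foldl (fun apps ind => apps ++ ((g ind).map (fun s => PySem.Str.strip s ++ ".")).toList) apps
      = apps ++ l.filterMap (fun ind => (g ind).map (fun s => PySem.Str.strip s ++ ".")) := by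
  induction l generalizing apps with
  | nil => simp
  | cons i rest ih =>
    rw [List.foldl_cons, ih]
    cases hgi : g i <;> simp [hgi]

-- B's inner loop over the indicator list, read through get?
theorem pvInnerB_get? (low v : String) (L : List String) (d : PySem.Dict String String) (ind : String) :
    (L.foldl (fun d i => if !d.contains i && PySem.Str.isIn i low then d.insert i v else d) d).get? ind
      = if ind ∈ L ∧ d.contains ind = false ∧ PySem.Str.isIn ind low = true then some v else d.get? ind := by
  induction L generalizing d with
  | nil => simp
  | cons i rest ih =>
    simp only [List.foldl_cons]
    by_cases hstep : (!d.contains i && PySem.Str.isIn i low) = true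
    · rw [if_pos hstep, ih]
      simp only [Bool.and_eq_true, Bool.not_eq_true'] at hstep
      by_cases hii : ind = i
      · subst hii
        have h2 : PySem.Chars.isIn ind.toList low.toList = true := by simpa using hstep.2
        simp [hstep.1, h2]
      · simp only [PySem.Dict.contains_insert, PySem.Dict.get?_insert,
          hii, false_or, List.mem_cons]
        by_cases hmem : ind ∈ rest <;> simp [hmem, hii]
    · rw [if_neg hstep, ih]
      simp only [Bool.and_eq_true, Bool.not_eq_true'] at hstep
      rw [not_and] at hstep
      by_cases hii : ind = i
      · subst hii
        simp only [List.mem_cons, true_or, true_and]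
        by_cases hc : d.contains ind = false
        · have h2 : PySem.Chars.isIn ind.toList low.toList = false := by
            simpa using hstep hc
          simp [hc, h2]
        · simp [hc]
      · simp [List.mem_cons, hii]

-- B's outer loop over the sentences, read through get?
theorem pvOuterB_get? (l : List String) (d : PySem.Dict String String) (ind : String)
    (hind : ind ∈ pvIndicators) :
    (l.foldl (fun d s =>
        let stripped := PySem.Str.strip s
        if (30 : Int) < PySem.Str.len stripped then
          let low := PySem.Str.lower s
          pvIndicators.foldl (fun d i =>
            if !d.contains i && PySem.Str.isIn i low then d.insert i (stripped ++ ".") else d) d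
        else d) d).get? ind
      = (d.get? ind).or (((l.find? (pvP ind)).map (fun s => PySem.Str.strip s ++ "."))) := by
  induction l generalizing d with
  | nil => simp
  | cons s rest ih =>
    simp only [List.foldl_cons]
    by_cases hlen : (30 : Int) < PySem.Str.len (PySem.Str.strip s)
    · simp only [hlen, if_true]
      rw [ih]
      rw [pvInnerB_get?]
      by_cases hc : d.contains ind = false
      · have hnone : d.get? ind = none := by
          rw [PySem.Dict.contains_eq_isSome_get?] at hc
          exact Option.not_isSome_iff_eq_none.mp (by simp [hc])
        by_cases hin : PySem.Str.isIn ind (PySem.Str.lower s) = true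
        · have hPt : pvP ind s = true := by unfold pvP; rw [hin]; simpa using hlen
          rw [List.find?_cons_of_pos hPt]
          have hin' : PySem.Chars.isIn ind.toList (PySem.Chars.lower s.toList) = true := by
            simpa using hin
          simp [hind, hc, hnone, hin']
        · have hPf : pvP ind s = false := by
            unfold pvP
            rw [Bool.and_eq_false_iff]
            exact Or.inl (by simpa using hin)
          rw [List.find?_cons_of_neg (by simp [hPf])]
          have hin' : PySem.Chars.isIn ind.toList (PySem.Chars.lower s.toList) = false := by
            simpa using hin
          simp [hind, hnone, hin']
      · have hsome : ∃ w, d.get? ind = some w := by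
          rw [PySem.Dict.contains_eq_isSome_get?] at hc
          cases hd : d.get? ind with
          | none => rw [hd] at hc; simp at hc
          | some w => exact ⟨w, rfl⟩
        rcases hsome with ⟨w, hw⟩
        simp [hc, hw]
    · simp only [hlen, if_false]
      rw [ih]
      have hPf : pvP ind s = false := by
        unfold pvP
        rw [Bool.and_eq_false_iff]
        exact Or.inr (decide_eq_false hlen)
      rw [List.find?_cons_of_neg (by simp [hPf])]

-- ===== VERDICT (by name: the statement is the Claim_ definition above) =====
theorem extract_market_applications_py_spec : Claim_equal_extract_market_applications_py := by
  intro content _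
  unfold Spec_extract_market_applications_py
  unfold extract_market_applications_py extract_market_applications_py_alt
  simp only []
  congr 1
  -- both sides reduce to pvIndicators.filterMap (first match, appended)
  have hA : pvIndicators.foldl (fun apps ind =>
      if PySem.Str.isIn ind (PySem.Str.lower content) then
        pvInnerA ind apps ((PySem.Str.split? content ".").getD [])
      else apps) []
      = pvIndicators.filterMap (fun ind =>
          ((((PySem.Str.split? content ".").getD []).find? (pvP ind)).map
            (fun s => PySem.Str.strip s ++ "."))) := by
    have hstep : ∀ (apps : List String) (ind : String),
        (if PySem.Str.isIn ind (PySem.Str.lower content) then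
          pvInnerA ind apps ((PySem.Str.split? content ".").getD [])
        else apps)
        = apps ++ ((((PySem.Str.split? content ".").getD []).find? (pvP ind)).map
            (fun s => PySem.Str.strip s ++ ".")).toList := by
      intro apps ind
      by_cases hg : PySem.Str.isIn ind (PySem.Str.lower content) = true
      · rw [if_pos hg, pvInnerA_eq]
      · rw [if_neg hg]
        have hnone : (((PySem.Str.split? content ".").getD []).find? (pvP ind)) = none := by
          rw [List.find?_eq_none]
          intro s hs
          simp only [pvP, Bool.and_eq_true, not_and, decide_eq_true_eq]
          intro hin
          exact absurd (pvGuard content ind s hs hin) hg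
        simp [hnone]
    calc pvIndicators.foldl (fun apps ind =>
          if PySem.Str.isIn ind (PySem.Str.lower content) then
            pvInnerA ind apps ((PySem.Str.split? content ".").getD [])
          else apps) []
        = pvIndicators.foldl (fun apps ind =>
            apps ++ ((((PySem.Str.split? content ".").getD []).find? (pvP ind)).map
              (fun s => PySem.Str.strip s ++ ".")).toList) [] := by
          have hFG : (fun (apps : List String) (ind : String) =>
              if PySem.Str.isIn ind (PySem.Str.lower content) then
                pvInnerA ind apps ((PySem.Str.split? content ".").getD [])
              else apps)
              = (fun (apps : List String) (ind : String) =>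
                apps ++ ((((PySem.Str.split? content ".").getD []).find? (pvP ind)).map
                  (fun s => PySem.Str.strip s ++ ".")).toList) := by
            funext apps ind
            exact hstep apps ind
          rw [hFG]
      _ = _ := by
          simpa using pvFoldlA pvIndicators
            (fun ind => (((PySem.Str.split? content ".").getD []).find? (pvP ind))) []
  have hB : pvIndicators.filterMap (fun ind =>
      (((PySem.Str.split? content ".").getD []).foldl (fun d s =>
        let stripped := PySem.Str.strip s
        if (30 : Int) < PySem.Str.len stripped then
          let low := PySem.Str.lower s
          pvIndicators.foldl (fun d i =>
            if !d.contains i && PySem.Str.isIn i low then d.insert i (stripped ++ ".") else d) d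
        else d) PySem.Dict.empty).get? ind)
      = pvIndicators.filterMap (fun ind =>
          ((((PySem.Str.split? content ".").getD []).find? (pvP ind)).map
            (fun s => PySem.Str.strip s ++ "."))) := by
    apply List.filterMap_congr
    intro ind hind
    rw [pvOuterB_get? _ _ _ hind]
    simp
  rw [hA, hB]
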